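-- pv_equiv track=rewrite | github.com/bhuvan0808/beuvian | BUVN-1.1/scripts/prepare_fineweb.py | stream_texts
-- ===== SOURCE A (Python) =====
-- def stream_texts(dataset_iter, max_texts=500_000, min_length=100):
--     """Yields clean text strings from the dataset iterator."""
--     count = 0
--     for sample in dataset_iter:
--         text = sample.get("text", "").strip()
--         if len(text) < min_length:
--             continue
--         yield text
--         count += 1
--         if count >= max_texts:
--             break
-- ===== SOURCE B (Python) =====
-- def stream_texts(dataset_iter, max_texts=500_000, min_length=100):
--     """Yield up to max_texts stripped texts of at least min_length.
--
--     Eager two-stage version: materialize the cleaned texts, keep the long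
--     enough ones, then emit the leading slice.  A non-positive cap yields
--     nothing.  Note: this consumes the whole input iterator up front.
--     """
--     kept = [t for t in (sample.get("text", "").strip() for sample in dataset_iter)
--             if len(t) >= min_length]
--     if max_texts > 0:
--         yield from kept[:max_texts]
-- ===== Notes on version B (the rewrite author's own statement) =====
-- stated objective: alternative
-- what changed: Replaces A's lazy counter loop with break-after-yield by an eager two-stage pipeline: materialize all cleaned texts, filter by length, then emit the leading slice of the kept list (return value only: B consumes the whole iterator up front, A stops early).
-- intended difference: On inputs with max_texts <= 0 that contain at least one qualifying text, A still yields the first qualifying text because its counter is only checked after yielding; B yields nothing, which is the intended meaning of a non-positive cap. — e.g. on stream_texts([[("text", "a")]], 0, 0): A returns ["a"], B returns []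
import Mathlib
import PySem

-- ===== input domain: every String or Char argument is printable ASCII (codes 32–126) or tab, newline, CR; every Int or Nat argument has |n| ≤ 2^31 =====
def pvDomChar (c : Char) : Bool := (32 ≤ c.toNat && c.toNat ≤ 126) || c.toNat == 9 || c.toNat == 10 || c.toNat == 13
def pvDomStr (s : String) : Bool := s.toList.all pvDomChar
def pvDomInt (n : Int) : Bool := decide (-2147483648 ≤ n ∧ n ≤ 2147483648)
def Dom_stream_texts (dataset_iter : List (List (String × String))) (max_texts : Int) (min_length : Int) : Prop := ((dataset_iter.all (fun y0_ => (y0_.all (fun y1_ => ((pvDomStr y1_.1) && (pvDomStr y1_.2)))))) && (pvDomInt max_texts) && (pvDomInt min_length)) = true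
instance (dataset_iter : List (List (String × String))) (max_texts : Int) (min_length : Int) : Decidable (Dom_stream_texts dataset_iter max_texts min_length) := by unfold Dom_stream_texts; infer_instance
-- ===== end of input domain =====

-- ===== PORT A =====
-- B replaces A's lazy counter loop by an eager materialize/filter/slice pipeline; equivalence is about
-- the yielded values only (B consumes the whole iterator up front, A stops early).

-- sample.get("text", "") on the association list (first match, default "")
def pyGetText (s : List (String × String)) : String :=
  ((s.find? (fun p => p.1 == "text")).map Prod.snd).getD ""

-- A's counter loop: count is the number of texts yielded so far
def streamTextsGo (dataset_iter : List (List (String × String))) (max_texts : Int) (min_length : Int) (count : Int) : List String :=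
  match dataset_iter with
  | [] => []
  | sample :: rest =>
    let text := PySem.Str.strip (pyGetText sample)
    if PySem.Str.len text < min_length then
      streamTextsGo rest max_texts min_length count
    else
      text :: (if count + 1 ≥ max_texts then [] else streamTextsGo rest max_texts min_length (count + 1))

def stream_texts (dataset_iter : List (List (String × String))) (max_texts : Int) (min_length : Int) : List String :=
  streamTextsGo dataset_iter max_texts min_length 0

-- ===== PORT B =====
def stream_texts_alt (dataset_iter : List (List (String × String))) (max_texts : Int) (min_length : Int) : List String :=
  let kept := ((dataset_iter.map (fun sample => PySem.Str.strip (pyGetText sample))).filter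
      (fun t => min_length ≤ PySem.Str.len t))
  if 0 < max_texts then kept.take max_texts.toNat else []

-- ===== PRECONDITION & SPEC =====
-- On inputs with max_texts ≤ 0 containing at least one qualifying text, A still yields the first
-- qualifying text (its counter is only checked after yielding); B yields nothing, which is the
-- intended meaning of a non-positive cap.
def D_stream_texts (dataset_iter : List (List (String × String))) (max_texts : Int) (min_length : Int) : Prop :=
  max_texts ≤ 0 ∧ ∃ sample ∈ dataset_iter,
    min_length ≤ ((PySem.Chars.strip ((PySem.Dict.mk sample).getD "text" "").toList).length : Int)
instance (dataset_iter : List (List (String × String))) (max_texts : Int) (min_length : Int) : Decidable (D_stream_texts dataset_iter max_texts min_length) := by unfold D_stream_texts; infer_instance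

def Spec_stream_texts (dataset_iter : List (List (String × String))) (max_texts : Int) (min_length : Int) (out : List String) : Prop := ¬ D_stream_texts dataset_iter max_texts min_length → out = stream_texts_alt dataset_iter max_texts min_length
instance (dataset_iter : List (List (String × String))) (max_texts : Int) (min_length : Int) (out : List String) : Decidable (Spec_stream_texts dataset_iter max_texts min_length out) := by unfold Spec_stream_texts; infer_instance

def pvDiffWitness_stream_texts : (List (List (String × String))) × Int × Int := ([[("text", "a")]], 0, 0)
def pvDiffWitnessOut_stream_texts : (List String) × (List String) := (["a"], [])

-- ===== CLAIM (what is proved, stated in full; the proofs are below) =====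
def Claim_unchanged_stream_texts : Prop := ∀ (dataset_iter : List (List (String × String))) (max_texts : Int) (min_length : Int), Dom_stream_texts dataset_iter max_texts min_length → Spec_stream_texts dataset_iter max_texts min_length (stream_texts dataset_iter max_texts min_length)
def Claim_changed_stream_texts : Prop := Dom_stream_texts (pvDiffWitness_stream_texts.1) (pvDiffWitness_stream_texts.2.1) (pvDiffWitness_stream_texts.2.2) ∧ D_stream_texts (pvDiffWitness_stream_texts.1) (pvDiffWitness_stream_texts.2.1) (pvDiffWitness_stream_texts.2.2) ∧ stream_texts (pvDiffWitness_stream_texts.1) (pvDiffWitness_stream_texts.2.1) (pvDiffWitness_stream_texts.2.2) = pvDiffWitnessOut_stream_texts.1 ∧ stream_texts_alt (pvDiffWitness_stream_texts.1) (pvDiffWitness_stream_texts.2.1) (pvDiffWitness_stream_texts.2.2) = pvDiffWitnessOut_stream_texts.2 ∧ pvDiffWitnessOut_stream_texts.1 ≠ pvDiffWitnessOut_stream_texts.2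
def Claim_exact_stream_texts : Prop := ∀ (dataset_iter : List (List (String × String))) (max_texts : Int) (min_length : Int), Dom_stream_texts dataset_iter max_texts min_length → D_stream_texts dataset_iter max_texts min_length → stream_texts dataset_iter max_texts min_length ≠ stream_texts_alt dataset_iter max_texts min_length

-- ===== LEMMAS AND PROOFS =====
-- loop invariant: A's counter loop from count c is the kept list truncated to max (max_texts - c) 1
theorem streamTextsGo_eq (dataset_iter : List (List (String × String))) (max_texts : Int) (min_length : Int) :
    ∀ c : Int, streamTextsGo dataset_iter max_texts min_length c =
      ((dataset_iter.map (fun s => PySem.Str.strip (pyGetText s))).filter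
        (fun t => min_length ≤ PySem.Str.len t)).take (max (max_texts - c) 1).toNat := by
  induction dataset_iter with
  | nil => intro c; simp [streamTextsGo]
  | cons sample rest ih =>
    intro c
    simp only [streamTextsGo, List.map_cons, List.filter_cons]
    by_cases h : PySem.Str.len (PySem.Str.strip (pyGetText sample)) < min_length
    · have hd : decide (min_length ≤ PySem.Str.len (PySem.Str.strip (pyGetText sample))) = false := by
        simp only [decide_eq_false_iff_not]; omega
      rw [if_pos h, ih c, hd, if_neg Bool.false_ne_true]
    · have hd : decide (min_length ≤ PySem.Str.len (PySem.Str.strip (pyGetText sample))) = true := by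
        simp only [decide_eq_true_eq]; omega
      rw [if_neg h, hd, if_pos rfl]
      by_cases hm : c + 1 ≥ max_texts
      · rw [if_pos hm]
        have h1 : (max (max_texts - c) 1).toNat = 1 := by omega
        rw [h1, List.take_succ_cons, List.take_zero]
      · rw [if_neg hm, ih (c + 1)]
        have h1 : (max (max_texts - c) 1).toNat = (max (max_texts - (c + 1)) 1).toNat + 1 := by
          omega
        rw [h1, List.take_succ_cons]

-- sample.get("text", "") said with the Dict primitive equals the ports' find?-based helper
theorem getD_text (s : List (String × String)) : (PySem.Dict.mk s).getD "text" "" = pyGetText s := by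
  induction s with
  | nil => rfl
  | cons h t ih =>
    obtain ⟨k, v⟩ := h
    simp only [PySem.Dict.getD, PySem.Dict.get?_mk_cons, pyGetText, List.find?] at *
    by_cases hk : k == "text" <;> simp [hk] at * <;> simpa using ih

-- the kept list is nonempty iff some sample qualifies (the condition D_ tests)
theorem kept_ne_nil_iff (d : List (List (String × String))) (l : Int) :
    (∃ sample ∈ d, l ≤ ((PySem.Chars.strip ((PySem.Dict.mk sample).getD "text" "").toList).length : Int)) ↔
    ((d.map (fun s => PySem.Str.strip (pyGetText s))).filter (fun t => l ≤ PySem.Str.len t)) ≠ [] := by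
  simp only [getD_text, ne_eq, List.filter_eq_nil_iff, List.mem_map, decide_eq_true_eq,
    PySem.Str.len_eq, not_forall]
  constructor
  · rintro ⟨s, hs, hl⟩
    exact ⟨_, ⟨s, hs, rfl⟩, by simpa [PySem.Str.toList_strip] using hl⟩
  · rintro ⟨t, ⟨s, hs, rfl⟩, hl⟩
    exact ⟨s, hs, by simpa [PySem.Str.toList_strip] using hl⟩

-- ===== VERDICT (by name: the statements are the Claim_ definitions above) =====
theorem stream_texts_spec : Claim_unchanged_stream_texts := by
  intro d m l _ hnd
  unfold stream_texts stream_texts_alt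
  rw [streamTextsGo_eq]
  by_cases hm : 0 < m
  · rw [if_pos hm]
    have : (max (m - 0) 1).toNat = m.toNat := by omega
    rw [this]
  · rw [if_neg hm]
    -- ¬ D_ and m ≤ 0, so no sample qualifies and the kept list is empty
    have hk : ((d.map (fun s => PySem.Str.strip (pyGetText s))).filter
        (fun t => l ≤ PySem.Str.len t)) = [] := by
      by_contra hne
      exact hnd ⟨by omega, (kept_ne_nil_iff d l).mpr hne⟩
    rw [hk, List.take_nil]

theorem stream_texts_changed : Claim_changed_stream_texts := by
  unfold Claim_changed_stream_texts; decide

theorem stream_texts_tight : Claim_exact_stream_texts := by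
  intro d m l _ hD
  obtain ⟨hm, hq⟩ := hD
  unfold stream_texts stream_texts_alt
  rw [streamTextsGo_eq, if_neg (by omega : ¬ 0 < m)]
  have hne := (kept_ne_nil_iff d l).mp hq
  have h1 : (max (m - 0) 1).toNat = 1 := by omega
  rw [h1]
  cases hk : ((d.map (fun s => PySem.Str.strip (pyGetText s))).filter
      (fun t => l ≤ PySem.Str.len t)) with
  | nil => exact absurd hk hne
  | cons a t => simp
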